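-- pv_equiv track=rewrite | github.com/victorgarmann/lab6 | kvidoria.py | pop_most_common_word
-- ===== SOURCE A (Python) =====
-- def pop_most_common_word(word_count):
--     oppslag = word_count
--     count = 0
--     most = None
--     for i in oppslag:
--         if oppslag[i] > count:
--             count = oppslag[i]
--             most = i
--     for i in oppslag:
--         if oppslag[i] == oppslag[most]:
--             if i < most:
--                 most = i
--     oppslag.pop(most)
--     return most
-- ===== SOURCE B (Python) =====
-- def pop_most_common_word(word_count):
--     most = sorted(word_count, key=lambda w: (-word_count[w], w))[0]
--     word_count.pop(most)
--     return most
-- ===== Notes on version B (the rewrite author's own statement) =====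
-- stated objective: simpler
-- what changed: A's two explicit linear scans (a running max with a >0 threshold, then a lexicographic tie-break scan) are replaced by sorting the keys once under the composite key (-count, word) and taking the first element of that order.
import Mathlib
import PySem

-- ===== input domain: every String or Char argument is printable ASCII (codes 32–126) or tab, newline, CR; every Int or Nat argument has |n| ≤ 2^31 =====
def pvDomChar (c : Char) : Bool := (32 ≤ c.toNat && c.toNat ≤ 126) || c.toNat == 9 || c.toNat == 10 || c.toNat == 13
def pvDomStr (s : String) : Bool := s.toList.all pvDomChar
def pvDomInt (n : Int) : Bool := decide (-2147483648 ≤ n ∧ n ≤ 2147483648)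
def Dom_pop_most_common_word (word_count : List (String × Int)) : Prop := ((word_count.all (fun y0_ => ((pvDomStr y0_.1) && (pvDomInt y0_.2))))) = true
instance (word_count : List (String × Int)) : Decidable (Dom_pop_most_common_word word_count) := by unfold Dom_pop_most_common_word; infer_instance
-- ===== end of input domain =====

-- B replaces A's two hand-written scans by one sort of the keys under the composite key
-- (-count, word) and takes the head of that order: simpler.  Both A and B pop the returned
-- key from the dict (an in-place mutation the caller can observe); the equivalence proved
-- here is about the RETURN value only.

-- ===== PORT A =====
def pop_most_common_word (word_count : List (String × Int)) : String :=
  let oppslag := PySem.Dict.ofList word_count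
  -- count = 0; most = None; for i in oppslag: if oppslag[i] > count: count = oppslag[i]; most = i
  let s1 := oppslag.keys.foldl
    (fun (s : Int × Option String) i =>
      if oppslag.getD i 0 > s.1 then (oppslag.getD i 0, some i) else s)
    (0, none)
  -- for i in oppslag: if oppslag[i] == oppslag[most]: if i < most: most = i
  -- (oppslag[most] with most = None raises KeyError in Python: excluded by Pre_;
  --  'most.getD ""' is the total form of that lookup, only reached outside Pre_)
  let most := oppslag.keys.foldl
    (fun (most : Option String) i =>
      if oppslag.getD i 0 = oppslag.getD (most.getD "") 0 then
        if i < most.getD "" then some i else most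
      else most)
    s1.2
  -- oppslag.pop(most) only mutates the dict; the return value is most
  most.getD ""

-- ===== PORT B =====
def pop_most_common_word_alt (word_count : List (String × Int)) : String :=
  let d := PySem.Dict.ofList word_count
  -- most = sorted(word_count, key=lambda w: (-word_count[w], w))[0]   (iterating the dict
  -- yields its keys; [0] on the empty dict raises IndexError: excluded by Pre_;
  -- '.getD ""' is only reached there)
  let order := PySem.List.sorted2 d.keys (fun w => -(d.getD w 0)) (fun w => w)
  (PySem.List.pyGet? order 0).getD ""

-- ===== PRECONDITION & SPEC =====
-- Pre_ excludes exactly the dicts whose values are all ≤ 0 (in particular the empty dict):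
-- there A's first loop leaves most = None and oppslag[None] raises KeyError.
def Pre_pop_most_common_word (word_count : List (String × Int)) : Prop :=
  ∃ v ∈ (PySem.Dict.ofList word_count).values, 0 < v
instance (word_count : List (String × Int)) : Decidable (Pre_pop_most_common_word word_count) := by unfold Pre_pop_most_common_word; infer_instance

def pvWitness_pop_most_common_word : (List (String × Int)) := [("a", 1), ("b", 2)]

def Spec_pop_most_common_word (word_count : List (String × Int)) (out : String) : Prop := out = pop_most_common_word_alt word_count
instance (word_count : List (String × Int)) (out : String) : Decidable (Spec_pop_most_common_word word_count out) := by unfold Spec_pop_most_common_word; infer_instance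

-- ===== CLAIM (what is proved, stated in full; the proofs are below) =====
def Claim_equal_pop_most_common_word : Prop := ∀ (word_count : List (String × Int)), Dom_pop_most_common_word word_count → Pre_pop_most_common_word word_count → Spec_pop_most_common_word word_count (pop_most_common_word word_count)
-- ===== LEMMAS AND PROOFS =====

-- A's first loop: the running count is the running max (floored at 0).
lemma foldA1_fst (f : String → Int) (ks : List String) (c : Int) (m : Option String) :
    (ks.foldl (fun (s : Int × Option String) i => if f i > s.1 then (f i, some i) else s) (c, m)).1
      = ks.foldl (fun a i => max a (f i)) c := by
  induction ks generalizing c m with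
  | nil => rfl
  | cons i ks ih =>
    simp only [List.foldl_cons]
    by_cases h : f i > c
    · rw [if_pos h, ih]; congr 1; omega
    · rw [if_neg h, ih]; congr 1; omega

-- A's first loop: most is either untouched (and then count is untouched too) or a key
-- attaining the final count.
lemma foldA1_snd (f : String → Int) (ks : List String) (c : Int) (m : Option String) :
    ((ks.foldl (fun (s : Int × Option String) i => if f i > s.1 then (f i, some i) else s) (c, m)).2 = m
      ∧ (ks.foldl (fun (s : Int × Option String) i => if f i > s.1 then (f i, some i) else s) (c, m)).1 = c)
    ∨ ∃ w ∈ ks,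
        (ks.foldl (fun (s : Int × Option String) i => if f i > s.1 then (f i, some i) else s) (c, m)).2 = some w
        ∧ f w = (ks.foldl (fun (s : Int × Option String) i => if f i > s.1 then (f i, some i) else s) (c, m)).1 := by
  induction ks generalizing c m with
  | nil => exact Or.inl ⟨rfl, rfl⟩
  | cons i ks ih =>
    simp only [List.foldl_cons]
    by_cases h : f i > c
    · rw [if_pos h]
      rcases ih (f i) (some i) with ⟨h2, h1⟩ | ⟨w, hw, h2, h1⟩
      · exact Or.inr ⟨i, List.mem_cons_self, h2, by rw [h1]⟩
      · exact Or.inr ⟨w, List.mem_cons_of_mem _ hw, h2, h1⟩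
    · rw [if_neg h]
      rcases ih c m with ⟨h2, h1⟩ | ⟨w, hw, h2, h1⟩
      · exact Or.inl ⟨h2, h1⟩
      · exact Or.inr ⟨w, List.mem_cons_of_mem _ hw, h2, h1⟩

-- A's second loop keeps a key of the same count throughout: it is the running string-min
-- over the keys whose count equals the count of the initial most.
lemma foldA2 (f : String → Int) (ks : List String) (m : String) :
    ks.foldl
        (fun (most : Option String) i =>
          if f i = f (most.getD "") then (if i < most.getD "" then some i else most) else most)
        (some m)
      = some ((ks.filter (fun i => decide (f i = f m))).foldl (fun a i => if i < a then i else a) m) := by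
  induction ks generalizing m with
  | nil => rfl
  | cons i ks ih =>
    simp only [List.foldl_cons, List.filter_cons, Option.getD_some]
    by_cases h : f i = f m
    · have hfilt : List.filter (fun j => decide (f j = f i)) ks
          = List.filter (fun j => decide (f j = f m)) ks :=
        List.filter_congr (fun j _ => by rw [h])
      simp only [h, decide_true, if_true, List.foldl_cons]
      by_cases hlt : i < m
      · rw [if_pos hlt, if_pos hlt, ih i, hfilt]
      · rw [if_neg hlt, if_neg hlt, ih m]
    · simp only [h, decide_false, Bool.false_eq_true, if_false]
      exact ih m

-- the running string-min: a member of m :: l, below m and below every element of l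
lemma foldMin_spec (l : List String) (m : String) :
    (l.foldl (fun a i => if i < a then i else a) m) ∈ m :: l
    ∧ (l.foldl (fun a i => if i < a then i else a) m) ≤ m
    ∧ ∀ y ∈ l, (l.foldl (fun a i => if i < a then i else a) m) ≤ y := by
  induction l generalizing m with
  | nil => exact ⟨List.mem_cons_self, le_refl m, by simp⟩
  | cons i l ih =>
    simp only [List.foldl_cons]
    by_cases h : i < m
    · rw [if_pos h]
      obtain ⟨hmem, hle, hall⟩ := ih i
      refine ⟨?_, le_trans hle (le_of_lt h), ?_⟩
      · rcases List.mem_cons.mp hmem with h' | h'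
        · rw [h']; exact List.mem_cons_of_mem _ List.mem_cons_self
        · exact List.mem_cons_of_mem _ (List.mem_cons_of_mem _ h')
      · intro y hy
        rcases List.mem_cons.mp hy with h' | h'
        · rw [h']; exact hle
        · exact hall y h'
    · rw [if_neg h]
      obtain ⟨hmem, hle, hall⟩ := ih m
      refine ⟨?_, hle, ?_⟩
      · rcases List.mem_cons.mp hmem with h' | h'
        · rw [h']; exact List.mem_cons_self
        · exact List.mem_cons_of_mem _ (List.mem_cons_of_mem _ h')
      · intro y hy
        rcases List.mem_cons.mp hy with h' | h'
        · rw [h']; exact le_trans hle (not_lt.mp h)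
        · exact hall y h'

-- the comparison sorted2 uses for key (-f w, w), as a named Boolean relation
def ltB (f : String → Int) (a b : String) : Bool :=
  decide (-(f a) < -(f b)) || (!decide (-(f b) < -(f a)) && decide (a < b))

lemma ltB_iff (f : String → Int) (a b : String) :
    ltB f a b = true ↔ (f b < f a ∨ (f b ≤ f a ∧ a < b)) := by
  unfold ltB
  simp only [Bool.or_eq_true, Bool.and_eq_true, Bool.not_eq_true', decide_eq_true_iff,
    decide_eq_false_iff_not]
  constructor
  · rintro (h | ⟨h1, h2⟩)
    · left; omega
    · right; exact ⟨by omega, h2⟩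
  · rintro (h | ⟨h1, h2⟩)
    · left; omega
    · right; exact ⟨by omega, h2⟩

-- ltB is transitive-enough and asymmetric (lexicographic order on (-count, word))
lemma ltB_trans (f : String → Int) {a b c : String}
    (h1 : ltB f a b = true) (h2 : ltB f b c = true) : ltB f a c = true := by
  rw [ltB_iff] at *
  rcases h1 with h1 | ⟨h1, h1'⟩ <;> rcases h2 with h2 | ⟨h2, h2'⟩
  · left; omega
  · left; omega
  · left; omega
  · right; exact ⟨by omega, lt_trans h1' h2'⟩

lemma ltB_asymm (f : String → Int) {a b : String}
    (h : ltB f a b = true) : ltB f b a = false := by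
  rw [Bool.eq_false_iff]
  intro h'
  rw [ltB_iff] at h h'
  rcases h with h | ⟨h1, h2⟩ <;> rcases h' with h' | ⟨h1', h2'⟩
  · omega
  · omega
  · omega
  · exact absurd h2' (not_lt.mpr (le_of_lt h2))

lemma ltB_irrefl (f : String → Int) (a : String) : ltB f a a = false := by
  rw [Bool.eq_false_iff]
  intro h
  rw [ltB_iff] at h
  rcases h with h | ⟨_, h⟩
  · omega
  · exact lt_irrefl a h

-- the insertion-sort fold keeps its head minimal under ltB
lemma foldInsert_head (f : String → Int) (xs : List String) :
    ∀ (h : String) (t : List String), (∀ y ∈ t, ltB f y h = false) →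
    ∃ h' t', xs.foldl (fun acc x => PySem.List.insertBy (ltB f) x acc) (h :: t) = h' :: t'
      ∧ (h' = h ∨ h' ∈ xs)
      ∧ (∀ y, (y ∈ h :: t ∨ y ∈ xs) → ltB f y h' = false) := by
  induction xs with
  | nil =>
    intro h t hmin
    refine ⟨h, t, rfl, Or.inl rfl, ?_⟩
    intro y hy
    rcases hy with hy | hy
    · rcases List.mem_cons.mp hy with h' | h'
      · rw [h']; exact ltB_irrefl f h
      · exact hmin y h'
    · exact absurd hy List.not_mem_nil
  | cons x xs ih =>
    intro h t hmin
    simp only [List.foldl_cons]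
    by_cases hx : ltB f x h = true
    · -- x is inserted at the head
      have hins : PySem.List.insertBy (ltB f) x (h :: t) = x :: h :: t := by
        show (if ltB f x h = true then x :: h :: t else h :: PySem.List.insertBy (ltB f) x t)
          = x :: h :: t
        rw [hx]; rfl
      rw [hins]
      have hmin' : ∀ y ∈ h :: t, ltB f y x = false := by
        intro y hy
        rcases List.mem_cons.mp hy with h' | h'
        · rw [h']; exact ltB_asymm f hx
        · rw [Bool.eq_false_iff]; intro hyx
          have := ltB_trans f hyx hx
          rw [hmin y h'] at this; exact Bool.false_ne_true this
      obtain ⟨h', t', heq, hmem, hall⟩ := ih x (h :: t) hmin'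
      refine ⟨h', t', heq, ?_, ?_⟩
      · rcases hmem with h'' | h''
        · exact Or.inr (h'' ▸ List.mem_cons_self)
        · exact Or.inr (List.mem_cons_of_mem _ h'')
      · intro y hy
        rcases hy with hy | hy
        · exact hall y (Or.inl (List.mem_cons_of_mem _ hy))
        · rcases List.mem_cons.mp hy with h'' | h''
          · exact hall y (Or.inl (h'' ▸ List.mem_cons_self))
          · exact hall y (Or.inr h'')
    · -- x goes further back; the head stays h
      have hins : PySem.List.insertBy (ltB f) x (h :: t)
          = h :: PySem.List.insertBy (ltB f) x t := by
        show (if ltB f x h = true then x :: h :: t else h :: PySem.List.insertBy (ltB f) x t)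
          = h :: PySem.List.insertBy (ltB f) x t
        rw [Bool.eq_false_iff.mpr hx]
        rfl
      rw [hins]
      have hmin' : ∀ y ∈ PySem.List.insertBy (ltB f) x t, ltB f y h = false := by
        intro y hy
        rcases (PySem.List.mem_insertBy _ _ _ _).mp hy with h' | h'
        · rw [h']; exact Bool.eq_false_iff.mpr hx
        · exact hmin y h'
      obtain ⟨h', t', heq, hmem, hall⟩ := ih h (PySem.List.insertBy (ltB f) x t) hmin'
      refine ⟨h', t', heq, ?_, ?_⟩
      · rcases hmem with h'' | h''
        · exact Or.inl h''
        · exact Or.inr (List.mem_cons_of_mem _ h'')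
      · intro y hy
        rcases hy with hy | hy
        · rcases List.mem_cons.mp hy with h'' | h''
          · exact hall y (Or.inl (h'' ▸ List.mem_cons_self))
          · exact hall y (Or.inl (List.mem_cons_of_mem _
              ((PySem.List.mem_insertBy _ _ _ _).mpr (Or.inr h''))))
        · rcases List.mem_cons.mp hy with h'' | h''
          · exact hall y (Or.inl (List.mem_cons_of_mem _
              ((PySem.List.mem_insertBy _ _ _ _).mpr (Or.inl h''))))
          · exact hall y (Or.inr h'')

-- the head of sorted2 under key (-f w, w) is a greatest-count, lexicographically least key
lemma sortedB_head (f : String → Int) (x : String) (rest : List String) :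
    ∃ b t, PySem.List.sorted2 (x :: rest) (fun w => -(f w)) (fun w => w) = b :: t
      ∧ b ∈ x :: rest
      ∧ ∀ y ∈ x :: rest, f y < f b ∨ (f y = f b ∧ b ≤ y) := by
  have hunf : PySem.List.sorted2 (x :: rest) (fun w => -(f w)) (fun w => w)
      = rest.foldl (fun acc x => PySem.List.insertBy (ltB f) x acc) [x] := by
    unfold PySem.List.sorted2
    simp only [if_neg (Bool.false_ne_true)]
    rfl
  obtain ⟨b, t, heq, hmem, hall⟩ := foldInsert_head f rest x [] (by simp)
  refine ⟨b, t, hunf.trans heq, ?_, ?_⟩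
  · rcases hmem with h | h
    · exact h ▸ List.mem_cons_self
    · exact List.mem_cons_of_mem _ h
  · intro y hy
    have hne : ltB f y b = false := by
      rcases List.mem_cons.mp hy with h | h
      · exact hall y (Or.inl (h ▸ List.mem_cons_self))
      · exact hall y (Or.inr h)
    rw [Bool.eq_false_iff] at hne
    by_cases hfy : f y < f b
    · exact Or.inl hfy
    · right
      have h1 : ¬ (f b < f y) := by
        intro h'; exact hne ((ltB_iff f y b).mpr (Or.inl h'))
      have h2 : ¬ (y < b) := by
        intro h'; exact hne ((ltB_iff f y b).mpr (Or.inr ⟨by omega, h'⟩))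
      exact ⟨by omega, not_lt.mp h2⟩

-- the two results agree for ANY count function f with a positive value on K
lemma glue (f : String → Int) (K : List String) (hpos : ∃ i ∈ K, 0 < f i) :
    ((K.foldl
        (fun (most : Option String) i =>
          if f i = f (most.getD "") then (if i < most.getD "" then some i else most) else most)
        ((K.foldl (fun (s : Int × Option String) i => if f i > s.1 then (f i, some i) else s)
            (0, none)).2)).getD "")
      = (PySem.List.pyGet? (PySem.List.sorted2 K (fun w => -(f w)) (fun w => w)) 0).getD "" := by
  obtain ⟨i0, hi0, hi0pos⟩ := hpos
  obtain ⟨hM0, hmax⟩ := PySem.List.le_foldl_max_int K f 0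
  have hMpos : 0 < K.foldl (fun a i => max a (f i)) 0 := lt_of_lt_of_le hi0pos (hmax i0 hi0)
  rcases foldA1_snd f K 0 none with ⟨h2, h1⟩ | ⟨m1, hm1K, hm1eq, hm1f⟩
  · exfalso; rw [foldA1_fst] at h1; omega
  · rw [hm1eq, foldA2 f K m1, Option.getD_some]
    have hm1fM : f m1 = K.foldl (fun a i => max a (f i)) 0 := by rw [hm1f, foldA1_fst]
    -- B's side
    have hKne : K ≠ [] := by intro h; rw [h] at hi0; exact (List.not_mem_nil) hi0
    obtain ⟨x, rest, hxt⟩ := List.exists_cons_of_ne_nil hKne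
    obtain ⟨b, t, hbeq, hbMem, hbAll⟩ := sortedB_head f x rest
    have hsorted : PySem.List.sorted2 K (fun w => -(f w)) (fun w => w) = b :: t := by
      rw [hxt]; exact hbeq
    have hget : PySem.List.pyGet? (b :: t) (0 : Int) = some b := by
      simp [PySem.List.pyGet?, PySem.List.pyIdx?]
    rw [hsorted, hget, Option.getD_some]
    -- A's result a: a key of maximal count, smallest among those
    set a := (K.filter (fun i => decide (f i = f m1))).foldl (fun a i => if i < a then i else a) m1
      with ha
    obtain ⟨haMem, haLe, haAll⟩ := foldMin_spec (K.filter (fun i => decide (f i = f m1))) m1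
    rw [← ha] at haMem haLe haAll
    have haK : a ∈ K := by
      rcases List.mem_cons.mp haMem with h' | h'
      · rw [h']; exact hm1K
      · exact List.mem_of_mem_filter h'
    have haM : f a = f m1 := by
      rcases List.mem_cons.mp haMem with h' | h'
      · rw [h']
      · exact of_decide_eq_true (List.mem_filter.mp h').2
    have hamin : ∀ y ∈ K, f y = f m1 → a ≤ y := by
      intro y hy hyM
      exact haAll y (List.mem_filter.mpr ⟨hy, decide_eq_true hyM⟩)
    -- B's result b: lexicographically minimal under (-count, word)
    have hbK : b ∈ K := by rw [hxt]; exact hbMem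
    have hbAllK : ∀ y ∈ K, f y < f b ∨ (f y = f b ∧ b ≤ y) := by rw [hxt]; exact hbAll
    -- antisymmetry
    have hfb : f b ≤ K.foldl (fun a i => max a (f i)) 0 := hmax b hbK
    have hfa : f a = K.foldl (fun a i => max a (f i)) 0 := by rw [haM, hm1fM]
    rcases hbAllK a haK with h' | ⟨h', h''⟩
    · omega
    · have hab : a ≤ b := hamin b hbK (by omega)
      exact le_antisymm hab h''

theorem pop_most_common_word_spec_aux (word_count : List (String × Int))
    (hpre : Pre_pop_most_common_word word_count) :
    pop_most_common_word word_count = pop_most_common_word_alt word_count := by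
  have hn : (PySem.Dict.ofList word_count).keys.Nodup := PySem.Dict.nodup_keys_ofList word_count
  obtain ⟨v, hv, hvpos⟩ := hpre
  rw [PySem.Dict.values_eq_map_keys _ hn 0] at hv
  obtain ⟨i0, hi0, hi0v⟩ := List.mem_map.mp hv
  have hpos : ∃ i ∈ (PySem.Dict.ofList word_count).keys,
      0 < (PySem.Dict.ofList word_count).getD i 0 := ⟨i0, hi0, by omega⟩
  exact glue (fun i => (PySem.Dict.ofList word_count).getD i 0)
    (PySem.Dict.ofList word_count).keys hpos

-- ===== VERDICT (by name: the statements are the Claim_ definitions above) =====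
theorem pop_most_common_word_spec : Claim_equal_pop_most_common_word := by
  intro word_count _ hpre
  unfold Spec_pop_most_common_word
  exact pop_most_common_word_spec_aux word_count hpre
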